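-- pv_equiv track=rewrite | github.com/PRHLT/OpenNMT-py | onmt/bin/simulate.py | get_character_level_corrections_prefix
-- ===== SOURCE A (Python) =====
-- def get_character_level_corrections_prefix(hyp, ref):
--     prefix = []
--     correction = ''
--     n = 0
--     while correction == '' and n < len(ref):
--         if n >= len(hyp):
--             correction += ref[n][0]
--             break
--         elif hyp[n] != ref[n]:
--             for i in range(len(hyp[n])):
--                 # La referencia es mas pequenya
--                 if i >= len(ref[n]):
--                     prefix.append(correction)
--                     correction = ''
--                     break
--                 correction += ref[n][i]
--                 # El error esta a mitad
--                 if ref[n][i] != hyp[n][i]: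
--                     break
--             # La referencia es mas grande
--             if hyp[n] == ref[n][:len(hyp[n])] and len(hyp[n]) < len(ref[n]):
--                 correction += ref[n][len(hyp[n])]
--             break
--         else:
--             prefix.append(ref[n])
--         n += 1
--
--     prefix.append(correction)
--     return prefix, correction
-- ===== SOURCE B (Python) =====
-- def get_character_level_corrections_prefix(hyp, ref):
--     # Flatten both word lists into token streams (word_index, char_index, char) with an
--     # end-of-word marker (word_index, -1, '') per word; find the first position where the
--     # streams disagree, then reconstruct the answer by slicing ref at that point.
--     def tokens(ws):
--         ts = []
--         for i, w in enumerate(ws):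
--             for j, ch in enumerate(w):
--                 ts.append((i, j, ch))
--             ts.append((i, -1, ''))
--         return ts
--     th = tokens(hyp)
--     tr = tokens(ref)
--     k = 0
--     while k < len(th) and k < len(tr) and th[k] == tr[k]:
--         k += 1
--     if k == len(tr):
--         return ref + [''], ''
--     n, j, _ = tr[k]
--     if j == -1:
--         return ref[:n] + [ref[n], ''], ''
--     corr = ref[n][:j + 1]
--     return ref[:n] + [corr], corr
-- ===== Notes on version B (the rewrite author's own statement) =====
-- stated objective: alternative
-- what changed: Instead of A's nested word-then-character scan with an incremental correction accumulator, break flags and a trailing prefix-of recheck, B flattens both word lists into flat token streams (word index, char index, char) with end-of-word markers, finds the single first position where the streams disagree, and reconstructs prefix and correction by slicing ref at that point.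
import Mathlib
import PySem

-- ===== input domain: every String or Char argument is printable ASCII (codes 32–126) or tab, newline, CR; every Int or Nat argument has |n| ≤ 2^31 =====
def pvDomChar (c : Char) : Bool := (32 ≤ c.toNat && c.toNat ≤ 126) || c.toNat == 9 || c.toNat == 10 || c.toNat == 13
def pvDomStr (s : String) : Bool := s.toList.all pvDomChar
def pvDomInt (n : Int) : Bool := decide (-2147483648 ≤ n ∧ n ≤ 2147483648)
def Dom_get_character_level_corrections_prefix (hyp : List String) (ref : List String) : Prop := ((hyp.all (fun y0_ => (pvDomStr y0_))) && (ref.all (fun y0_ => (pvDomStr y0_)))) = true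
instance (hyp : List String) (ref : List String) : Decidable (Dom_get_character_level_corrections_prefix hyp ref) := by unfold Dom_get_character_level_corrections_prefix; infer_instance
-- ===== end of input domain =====

-- B replaces A's nested word/char scan with break/reset flags by a different algorithm: flatten
-- both word lists into token streams with end-of-word markers, find the first position where the
-- streams disagree, and reconstruct the answer by slicing ref there (objective: alternative).

-- ===== PORT A =====
-- A's inner `for i in range(len(hyp[n]))` loop: accumulates correction chars;
-- the Bool records whether the "reference shorter" branch fired
-- (prefix.append(correction); correction = ''; break).
def pvA_for : List Char → List Char → List Char → List Char × Bool
  | [], _, corr => (corr, false)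
  | _ :: _, [], corr => (corr, true)
  | hc :: ht, rc :: rt, corr =>
      let corr' := corr ++ [rc]
      if rc ≠ hc then (corr', false) else pvA_for ht rt corr'

-- the `hyp[n] != ref[n]` branch of A's while loop: returns (strings appended to prefix, correction)
def pvA_word (h r corrS : String) : List String × String :=
  let fr := pvA_for h.toList r.toList corrS.toList
  let cl := if fr.2 then ([] : List Char) else fr.1
  let cl' := if h.toList = r.toList.take h.toList.length ∧ h.toList.length < r.toList.length
             then cl ++ [r.toList.getD h.toList.length ' ']
             else cl
  ((if fr.2 then [String.ofList fr.1] else []) ++ [String.ofList cl'], String.ofList cl')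

-- A's while loop; breaks are returned directly (corr is the running `correction`).
def pvA_loop : List String → List String → String → List String → List String × String
  | _, [], corr, pref => (pref ++ [corr], corr)
  | [], r :: _, corr, pref =>
    if corr ≠ "" then (pref ++ [corr], corr)
    else
      -- correction += ref[n][0]; break   (IndexError when ref[n] = '' is outside Pre_)
      let corr' := String.ofList (corr.toList ++ (match PySem.Str.pyGet? r 0 with | some ch => [ch] | none => []))
      (pref ++ [corr'], corr')
  | h :: ht, r :: rt, corr, pref =>
    if corr ≠ "" then (pref ++ [corr], corr)
    else if h ≠ r then
      let w := pvA_word h r corr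
      (pref ++ w.1, w.2)
    else pvA_loop ht rt corr (pref ++ [r])

def get_character_level_corrections_prefix (hyp : List String) (ref : List String) : List String × String :=
  pvA_loop hyp ref "" []

-- ===== PORT B =====
-- Source B's `tokens(ws)`: one token (i, j, ch) per character plus an end-of-word marker (i, -1, '')
-- per word; the marker's '' payload is ported as the dummy char ' ' (only (i, -1) distinguishes it:
-- char tokens always have j ≥ 0, so equality of tokens is unaffected).
def pvB_wordToks (i : Int) (w : String) : List (Int × Int × Char) :=
  ((PySem.List.enumerate w.toList).map (fun jc => (i, jc.1, jc.2))) ++ [(i, -1, ' ')]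

def pvB_tokens (ws : List String) : List (Int × Int × Char) :=
  (PySem.List.enumerate ws).flatMap (fun iw => pvB_wordToks iw.1 iw.2)

-- Source B's `while k < len(th) and k < len(tr) and th[k] == tr[k]: k += 1`
def pvB_k : List (Int × Int × Char) → List (Int × Int × Char) → Nat
  | a :: as, b :: bs => if a = b then pvB_k as bs + 1 else 0
  | _, _ => 0

def get_character_level_corrections_prefix_alt (hyp : List String) (ref : List String) : List String × String :=
  let th := pvB_tokens hyp
  let tr := pvB_tokens ref
  let k := pvB_k th tr
  if k = tr.length then (ref ++ [""], "")
  else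
    -- tr[k] (in range since k < len(tr)); word/char indices are nonnegative by construction
    let t := tr.getD k (0, -1, ' ')
    if t.2.1 = -1 then
      (ref.take t.1.toNat ++ [ref.getD t.1.toNat "", ""], "")
    else
      let corr := String.ofList ((ref.getD t.1.toNat "").toList.take (t.2.1 + 1).toNat)
      (ref.take t.1.toNat ++ [corr], corr)

-- ===== PRECONDITION & SPEC =====
-- Pre_ excludes exactly the inputs where Python A raises IndexError (`ref[n][0]` with
-- ref[n] = '' reached after hyp is exhausted as an equal prefix of ref).
def Pre_get_character_level_corrections_prefix (hyp : List String) (ref : List String) : Prop :=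
  ¬ (hyp.length < ref.length ∧ hyp = ref.take hyp.length ∧ ref.getD hyp.length "" = "")
instance (hyp : List String) (ref : List String) : Decidable (Pre_get_character_level_corrections_prefix hyp ref) := by
  unfold Pre_get_character_level_corrections_prefix; infer_instance

def pvWitness_get_character_level_corrections_prefix : List String × List String := (["a"], ["ax", "b"])


def Spec_get_character_level_corrections_prefix (hyp : List String) (ref : List String) (out : List String × String) : Prop := out = get_character_level_corrections_prefix_alt hyp ref
instance (hyp : List String) (ref : List String) (out : List String × String) : Decidable (Spec_get_character_level_corrections_prefix hyp ref out) := by unfold Spec_get_character_level_corrections_prefix; infer_instance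

-- ===== CLAIM (what is proved, stated in full; the proofs are below) =====
def Claim_equal_get_character_level_corrections_prefix : Prop := ∀ (hyp : List String) (ref : List String), Dom_get_character_level_corrections_prefix hyp ref → Pre_get_character_level_corrections_prefix hyp ref → Spec_get_character_level_corrections_prefix hyp ref (get_character_level_corrections_prefix hyp ref)

-- ===== LEMMAS AND PROOFS =====

-- intermediate characterisation of the result (word scan + three-way split), used only in proofs
def pvS_common : List Char → List Char → Nat
  | hc :: ht, rc :: rt => if hc = rc then pvS_common ht rt + 1 else 0
  | _, _ => 0

def pvS_word (h r : String) : List String × String :=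
  let c := pvS_common h.toList r.toList
  if c = r.toList.length then ([r, ""], "")
  else
    let corr := String.ofList (r.toList.take (c + 1))
    ([corr], corr)

def pvS_loop : List String → List String → List String → List String × String
  | _, [], pref => (pref ++ [""], "")
  | [], r :: _, pref =>
    let corr := String.ofList (match PySem.Str.pyGet? r 0 with | some ch => [ch] | none => [])
    (pref ++ [corr], corr)
  | h :: ht, r :: rt, pref =>
    if h = r then pvS_loop ht rt (pref ++ [r])
    else
      let w := pvS_word h r
      (pref ++ w.1, w.2)

theorem pvS_common_le_left (hl rl : List Char) : pvS_common hl rl ≤ hl.length := by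
  induction hl generalizing rl with
  | nil => simp [pvS_common]
  | cons hc ht ih =>
    cases rl with
    | nil => simp [pvS_common]
    | cons rc rt =>
      simp only [pvS_common]
      split
      · have := ih rt; simp; omega
      · simp

theorem pvS_common_le_right (hl rl : List Char) : pvS_common hl rl ≤ rl.length := by
  induction hl generalizing rl with
  | nil => simp [pvS_common]
  | cons hc ht ih =>
    cases rl with
    | nil => simp [pvS_common]
    | cons rc rt =>
      simp only [pvS_common]
      split
      · have := ih rt; simp; omega
      · simp

theorem pvS_common_append (hl t : List Char) : pvS_common hl (hl ++ t) = hl.length := by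
  induction hl with
  | nil => cases t <;> simp [pvS_common]
  | cons hc ht ih => simp [pvS_common, ih]

theorem pvS_common_take (hl rl : List Char) (h : pvS_common hl rl = hl.length) :
    hl = rl.take hl.length := by
  induction hl generalizing rl with
  | nil => simp
  | cons hc ht ih =>
    cases rl with
    | nil => simp [pvS_common] at h
    | cons rc rt =>
      simp only [pvS_common] at h
      by_cases he : hc = rc
      · simp [he] at h
        simpa [he] using ih rt h
      · simp [he] at h

theorem pvS_common_of_take (hl rl : List Char) (h : hl = rl.take hl.length)
    (_hle : hl.length ≤ rl.length) : pvS_common hl rl = hl.length := by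
  have hr : rl = hl ++ rl.drop hl.length := by
    conv_lhs => rw [← List.take_append_drop hl.length rl, ← h]
  rw [hr]
  exact pvS_common_append _ _

theorem pv_take_succ_getD (l : List Char) (n : Nat) (h : n < l.length) :
    l.take n ++ [l.getD n ' '] = l.take (n + 1) := by
  induction l generalizing n with
  | nil => simp at h
  | cons x xs ih =>
    cases n with
    | zero => simp [List.getD]
    | succ m =>
      simp only [List.length_cons] at h
      simp only [List.take_succ_cons, List.getD_cons_succ, List.cons_append]
      rw [ih m (by omega)]

theorem pvA_for_spec (hl rl acc : List Char) (hne : hl ≠ rl) :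
    pvA_for hl rl acc =
      if pvS_common hl rl = rl.length then (acc ++ rl, true)
      else if pvS_common hl rl = hl.length then (acc ++ rl.take hl.length, false)
      else (acc ++ rl.take (pvS_common hl rl + 1), false) := by
  induction hl generalizing rl acc with
  | nil =>
    cases rl with
    | nil => exact absurd rfl hne
    | cons rc rt => simp [pvA_for, pvS_common]
  | cons hc ht ih =>
    cases rl with
    | nil => simp [pvA_for, pvS_common]
    | cons rc rt =>
      by_cases he : hc = rc
      · subst he
        have hne' : ht ≠ rt := fun h => hne (by rw [h])
        have hstep : pvA_for (hc :: ht) (hc :: rt) acc = pvA_for ht rt (acc ++ [hc]) := by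
          simp [pvA_for]
        have hcom : pvS_common (hc :: ht) (hc :: rt) = pvS_common ht rt + 1 := by
          simp [pvS_common]
        rw [hstep, ih rt (acc ++ [hc]) hne', hcom]
        by_cases h1 : pvS_common ht rt = rt.length
        · simp [h1]
        · by_cases h2 : pvS_common ht rt = ht.length
          · rw [if_neg h1, if_pos h2,
              if_neg (show ¬ pvS_common ht rt + 1 = (hc :: rt).length by simp only [List.length_cons]; omega),
              if_pos (show pvS_common ht rt + 1 = (hc :: ht).length by simp only [List.length_cons]; omega)]
            simp
          · rw [if_neg h1, if_neg h2,
              if_neg (show ¬ pvS_common ht rt + 1 = (hc :: rt).length by simp only [List.length_cons]; omega),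
              if_neg (show ¬ pvS_common ht rt + 1 = (hc :: ht).length by simp only [List.length_cons]; omega)]
            simp
      · have h0 : pvS_common (hc :: ht) (rc :: rt) = 0 := by simp [pvS_common, he]
        have hstep : pvA_for (hc :: ht) (rc :: rt) acc = (acc ++ [rc], false) := by
          simp [pvA_for, Ne.symm he]
        rw [hstep, h0, if_neg (by simp), if_neg (by simp)]
        simp

-- the first differing word: A's inner loop + post-check equals the three-way split
theorem pv_word_eq (h r : String) (hne : ¬ h = r) : pvA_word h r "" = pvS_word h r := by
  have hlne : h.toList ≠ r.toList := fun hh => hne (String.toList_inj.mp hh)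
  have h0 : ("" : String).toList = [] := rfl
  have hfor := pvA_for_spec h.toList r.toList [] hlne
  unfold pvA_word pvS_word
  rw [h0]
  by_cases h1 : pvS_common h.toList r.toList = r.toList.length
  · have hge : r.toList.length ≤ h.toList.length := h1 ▸ pvS_common_le_left _ _
    rw [if_pos h1] at *
    have hpost : ¬ (h.toList = r.toList.take h.toList.length ∧ h.toList.length < r.toList.length) := by
      rintro ⟨-, hlt⟩; omega
    rw [hfor]
    simp only [List.nil_append, if_neg hpost, if_true]
    simp [String.ofList_toList]
  · rw [if_neg h1] at *
    have hlt : pvS_common h.toList r.toList < r.toList.length :=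
      lt_of_le_of_ne (pvS_common_le_right _ _) h1
    by_cases h2 : pvS_common h.toList r.toList = h.toList.length
    · rw [if_pos h2] at hfor
      have hpost : h.toList = r.toList.take h.toList.length ∧ h.toList.length < r.toList.length :=
        ⟨pvS_common_take _ _ h2, by omega⟩
      rw [hfor]
      simp only [List.nil_append, if_pos hpost, Bool.false_eq_true, if_false]
      rw [← h2, pv_take_succ_getD _ _ hlt]
    · rw [if_neg h2] at hfor
      have hpost : ¬ (h.toList = r.toList.take h.toList.length ∧ h.toList.length < r.toList.length) := by
        rintro ⟨htake, hlt2⟩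
        exact h2 (pvS_common_of_take _ _ htake (by omega))
      rw [hfor]
      simp only [List.nil_append, if_neg hpost, Bool.false_eq_true, if_false]

theorem pv_loop_eq (rs hs pref : List String) :
    pvA_loop hs rs "" pref = pvS_loop hs rs pref := by
  induction rs generalizing hs pref with
  | nil => cases hs <;> simp [pvA_loop, pvS_loop]
  | cons r rt ih =>
    have hcorr : ¬ ("" : String) ≠ "" := fun k => k rfl
    cases hs with
    | nil =>
      simp only [pvA_loop, pvS_loop, if_neg hcorr]
      rfl
    | cons h ht =>
      by_cases he : h = r
      · simp only [pvA_loop, pvS_loop, if_neg hcorr, if_neg (show ¬ h ≠ r from fun k => k he),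
          if_pos he]
        exact ih ht (pref ++ [r])
      · simp only [pvA_loop, pvS_loop, if_neg hcorr, if_pos he, if_neg he]
        rw [pv_word_eq h r he]

-- pvS_loop prepends its accumulator
theorem pvS_loop_pref (rs hs pref : List String) :
    pvS_loop hs rs pref = (pref ++ (pvS_loop hs rs []).1, (pvS_loop hs rs []).2) := by
  induction rs generalizing hs pref with
  | nil => cases hs <;> simp [pvS_loop]
  | cons r rt ih =>
    cases hs with
    | nil => simp [pvS_loop]
    | cons h ht =>
      by_cases he : h = r
      · simp only [pvS_loop, if_pos he]
        rw [ih ht (pref ++ [r]), ih ht ([] ++ [r])]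
        simp
      · simp [pvS_loop, he]

-- ---- token-stream lemmas ----

-- char tokens of one word starting at char index j; word tokens; token streams from word index s
def pvCt (i j : Int) (l : List Char) : List (Int × Int × Char) :=
  (PySem.List.enumerate l j).map (fun jc => (i, jc.1, jc.2))

def pvTa (s : Int) (ws : List String) : List (Int × Int × Char) :=
  (PySem.List.enumerate ws s).flatMap (fun iw => pvB_wordToks iw.1 iw.2)

theorem pvCt_nil (i j : Int) : pvCt i j [] = [] := by simp [pvCt, PySem.List.enumerate_nil]

theorem pvCt_cons (i j : Int) (c : Char) (cs : List Char) :
    pvCt i j (c :: cs) = (i, j, c) :: pvCt i (j + 1) cs := by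
  simp [pvCt, PySem.List.enumerate_cons]

theorem pvWordToks_eq (i : Int) (w : String) :
    pvB_wordToks i w = pvCt i 0 w.toList ++ [(i, -1, ' ')] := rfl

theorem pvTa_nil (s : Int) : pvTa s [] = [] := by simp [pvTa, PySem.List.enumerate_nil]

theorem pvTa_cons (s : Int) (w : String) (ws : List String) :
    pvTa s (w :: ws) = pvB_wordToks s w ++ pvTa (s + 1) ws := by
  simp [pvTa, PySem.List.enumerate_cons]

theorem pvB_tokens_eq (ws : List String) : pvB_tokens ws = pvTa 0 ws := rfl

theorem pvTa_cons' (s : Int) (w : String) (ws : List String) :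
    pvTa s (w :: ws) = pvCt s 0 w.toList ++ ((s, -1, ' ') :: pvTa (s + 1) ws) := by
  rw [pvTa_cons, pvWordToks_eq, List.append_assoc]
  rfl

theorem pvB_k_nil_right (a : List (Int × Int × Char)) : pvB_k a [] = 0 := by
  cases a <;> rfl

theorem pvB_k_nil_left (b : List (Int × Int × Char)) : pvB_k [] b = 0 := by
  cases b <;> rfl

theorem pvB_k_le_right (a b : List (Int × Int × Char)) : pvB_k a b ≤ b.length := by
  induction a generalizing b with
  | nil => simp [pvB_k]
  | cons x xs ih =>
    cases b with
    | nil => simp [pvB_k]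
    | cons y ys =>
      simp only [pvB_k]
      split
      · have := ih ys; simp; omega
      · simp

theorem pvB_k_append (x a b : List (Int × Int × Char)) :
    pvB_k (x ++ a) (x ++ b) = x.length + pvB_k a b := by
  induction x with
  | nil => simp
  | cons c cs ih => simp [pvB_k, ih]; omega

theorem pvCt_length (i j : Int) (l : List Char) : (pvCt i j l).length = l.length := by
  simp [pvCt, PySem.List.length_enumerate]

theorem pvCt_getD (i j : Int) (l : List Char) (n : Nat) (h : n < l.length) (d : Int × Int × Char) :
    (pvCt i j l).getD n d = (i, j + n, l.getD n ' ') := by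
  induction l generalizing j n with
  | nil => simp at h
  | cons c cs ih =>
    rw [pvCt_cons]
    cases n with
    | zero => simp
    | succ m =>
      simp only [List.getD_cons_succ]
      rw [ih (j + 1) m (by simpa using Nat.lt_of_succ_lt_succ h)]
      simp; omega

theorem pv_mem_wordToks {t : Int × Int × Char} {i : Int} {w : String}
    (h : t ∈ pvB_wordToks i w) : t.1 = i := by
  rw [pvWordToks_eq] at h
  rcases List.mem_append.mp h with h | h
  · simp only [pvCt] at h
    rcases List.mem_map.mp h with ⟨jc, -, rfl⟩
    rfl
  · simp at h; rw [h]

theorem pv_mem_pvTa {t : Int × Int × Char} (s : Int) (ws : List String)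
    (h : t ∈ pvTa s ws) : s ≤ t.1 := by
  induction ws generalizing s with
  | nil => rw [pvTa_nil] at h; simp at h
  | cons w ws ih =>
    rw [pvTa_cons] at h
    rcases List.mem_append.mp h with h | h
    · exact le_of_eq (pv_mem_wordToks h).symm
    · have := ih (s + 1) h; omega

theorem pv_getD_mem {α : Type} (l : List α) (n : Nat) (d : α) (h : n < l.length) :
    l.getD n d ∈ l := by
  rw [List.getD_eq_getElem l d h]
  exact List.getElem_mem h

-- k for the first differing word: the token comparison stops at the char common-prefix length
theorem pvK_word (hl rl : List Char) (hne : hl ≠ rl) (i : Int) :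
    ∀ (j : Int), 0 ≤ j → ∀ (a b : List (Int × Int × Char)),
    pvB_k (pvCt i j hl ++ (i, -1, ' ') :: a) (pvCt i j rl ++ (i, -1, ' ') :: b)
      = pvS_common hl rl := by
  induction hl generalizing rl with
  | nil =>
    intro j hj a b
    cases rl with
    | nil => exact absurd rfl hne
    | cons rc rcs =>
      rw [pvCt_nil, pvCt_cons]
      simp only [List.nil_append, List.cons_append, pvB_k, pvS_common]
      rw [if_neg]
      intro hc; injection hc with h1 h2; injection h2 with h2 _; omega
  | cons hc hcs ih =>
    intro j hj a b
    cases rl with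
    | nil =>
      rw [pvCt_nil, pvCt_cons]
      simp only [List.nil_append, List.cons_append, pvB_k, pvS_common]
      rw [if_neg]
      intro hc'; injection hc' with h1 h2; injection h2 with h2 _; omega
    | cons rc rcs =>
      rw [pvCt_cons, pvCt_cons]
      simp only [List.cons_append, pvB_k, pvS_common]
      by_cases he : hc = rc
      · subst he
        rw [if_pos rfl, if_pos rfl]
        have hne' : hcs ≠ rcs := fun h => hne (by rw [h])
        rw [ih rcs hne' (j + 1) (by omega) a b]
      · rw [if_neg (by intro hc'; injection hc' with _ h2; injection h2 with _ h3; exact he h3),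
          if_neg he]

-- select-and-slice step of B, with word indices taken relative to start s (proof helper)
def pvSelT (rs : List String) (s : Int) (tlen : Nat) (k : Nat) (t : Int × Int × Char) : List String × String :=
  if k = tlen then (rs ++ [""], "")
  else if t.2.1 = -1 then
    (rs.take (t.1 - s).toNat ++ [rs.getD (t.1 - s).toNat "", ""], "")
  else
    (rs.take (t.1 - s).toNat ++ [String.ofList ((rs.getD (t.1 - s).toNat "").toList.take (t.2.1 + 1).toNat)],
     String.ofList ((rs.getD (t.1 - s).toNat "").toList.take (t.2.1 + 1).toNat))

def pvSel (s : Int) (hs rs : List String) : List String × String :=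
  pvSelT rs s (pvTa s rs).length (pvB_k (pvTa s hs) (pvTa s rs))
    ((pvTa s rs).getD (pvB_k (pvTa s hs) (pvTa s rs)) (0, -1, ' '))

theorem pv_alt_sel (hyp ref : List String) :
    get_character_level_corrections_prefix_alt hyp ref = pvSel 0 hyp ref := by
  unfold get_character_level_corrections_prefix_alt pvSel pvSelT
  simp [pvB_tokens_eq]

-- main induction: B's token selection equals the staged characterisation
theorem pvSel_eq (rs hs : List String) (s : Int)
    (hp : ¬ (hs.length < rs.length ∧ hs = rs.take hs.length ∧ rs.getD hs.length "" = "")) :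
    pvSel s hs rs = pvS_loop hs rs [] := by
  induction rs generalizing hs s with
  | nil =>
    cases hs <;> simp [pvSel, pvSelT, pvTa_nil, pvB_k_nil_right, pvS_loop]
  | cons r rt ih =>
    cases hs with
    | nil =>
      have hr : r ≠ "" := by
        intro h
        exact hp (by simp [h])
      obtain ⟨rc, rcs, hrl⟩ : ∃ rc rcs, r.toList = rc :: rcs := by
        cases hl : r.toList with
        | nil => exact absurd (String.toList_inj.mp hl) hr
        | cons a b => exact ⟨a, b, rfl⟩
      unfold pvSel
      rw [pvTa_nil, pvB_k_nil_left, pvTa_cons', hrl, pvCt_cons]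
      simp only [List.cons_append]
      unfold pvSelT
      rw [if_neg (by simp)]
      simp only [List.getD_cons_zero]
      rw [if_neg (by simp)]
      simp [pvS_loop, hrl]
    | cons h ht =>
      by_cases he : h = r
      · subst he
        -- equal words: both sides prepend h and recurse
        have hp' : ¬ (ht.length < rt.length ∧ ht = rt.take ht.length ∧ rt.getD ht.length "" = "") := by
          rintro ⟨h1, h2, h3⟩
          exact hp ⟨by simp; omega, by simp [List.take_succ_cons]; exact h2,
            by simpa [List.getD_cons_succ] using h3⟩
        have hstep : pvSel s (h :: ht) (h :: rt) =
            ([h] ++ (pvSel (s+1) ht rt).1, (pvSel (s+1) ht rt).2) := by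
          unfold pvSel
          simp only [pvTa_cons, pvB_k_append]
          set W := pvB_wordToks s h with hW
          set th' := pvTa (s+1) ht with hth
          set tr' := pvTa (s+1) rt with htr
          set k' := pvB_k th' tr' with hk'
          unfold pvSelT
          by_cases hcase : k' = tr'.length
          · rw [if_pos (by simp [hcase]), if_pos hcase]
            simp
          · have hklt : k' < tr'.length :=
              lt_of_le_of_ne (pvB_k_le_right _ _) hcase
            rw [if_neg (by simp; omega), if_neg hcase]
            rw [List.getD_append_right _ _ _ _ (by omega)]
            have hsub : W.length + k' - W.length = k' := by omega
            rw [hsub]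
            set t := tr'.getD k' (0, -1, ' ') with ht'
            have htm : t ∈ tr' := pv_getD_mem _ _ _ hklt
            have hge : s + 1 ≤ t.1 := pv_mem_pvTa _ _ htm
            have hnat : (t.1 - s).toNat = (t.1 - (s+1)).toNat + 1 := by omega
            rw [hnat]
            by_cases hj : t.2.1 = -1
            · rw [if_pos hj, if_pos hj]
              simp [List.take_succ_cons]
            · rw [if_neg hj, if_neg hj]
              simp [List.take_succ_cons]
        have hloop : pvS_loop (h :: ht) (h :: rt) [] = pvS_loop ht rt ([] ++ [h]) := by
          simp [pvS_loop]
        rw [hstep, ih ht (s+1) hp', hloop, pvS_loop_pref rt ht ([] ++ [h])]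
        simp
      · -- first differing word: the mismatch is inside (or at the end marker of) word 0
        have hlne : h.toList ≠ r.toList := fun hh => he (String.toList_inj.mp hh)
        set c := pvS_common h.toList r.toList with hc
        have hcr : c ≤ r.toList.length := pvS_common_le_right _ _
        unfold pvSel
        rw [pvTa_cons' s h ht, pvTa_cons' s r rt,
          pvK_word h.toList r.toList hlne s 0 le_rfl (pvTa (s+1) ht) (pvTa (s+1) rt), ← hc]
        have hsloop : pvS_loop (h :: ht) (r :: rt) [] = ([] ++ (pvS_word h r).1, (pvS_word h r).2) := by
          simp [pvS_loop, he]
        rw [hsloop]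
        unfold pvSelT
        have hlen : (pvCt s 0 r.toList ++ ((s, -1, ' ') :: pvTa (s+1) rt)).length
            = r.toList.length + 1 + (pvTa (s+1) rt).length := by
          simp [pvCt_length]; omega
        rw [if_neg (by rw [hlen]; omega)]
        by_cases hcase : c = r.toList.length
        · -- r's word is a strict prefix of h's: mismatch at r's end marker
          have hget : (pvCt s 0 r.toList ++ ((s, -1, ' ') :: pvTa (s+1) rt)).getD c (0, -1, ' ')
              = (s, -1, ' ') := by
            rw [List.getD_append_right _ _ _ _ (by rw [pvCt_length]; omega)]
            rw [pvCt_length, hcase]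
            simp
          rw [hget, if_pos rfl]
          unfold pvS_word
          rw [← hc, if_pos hcase]
          simp
        · have hclt : c < r.toList.length := lt_of_le_of_ne hcr hcase
          have hget : (pvCt s 0 r.toList ++ ((s, -1, ' ') :: pvTa (s+1) rt)).getD c (0, -1, ' ')
              = (s, (0 : Int) + c, r.toList.getD c ' ') := by
            rw [List.getD_append _ _ _ _ (by rw [pvCt_length]; omega)]
            exact pvCt_getD s 0 r.toList c hclt _
          rw [hget, if_neg (by simp)]
          unfold pvS_word
          rw [← hc, if_neg hcase]
          have h1 : (((s, (0:Int) + (c:Int), r.toList.getD c ' ') : Int × Int × Char).2.1 + 1).toNat = c + 1 := by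
            simp
          have h2 : (((s, (0:Int) + (c:Int), r.toList.getD c ' ') : Int × Int × Char).1 - s).toNat = 0 := by simp
          rw [h1, h2]
          simp

-- ===== VERDICT (by name: the statement is the Claim_ definition above) =====
theorem get_character_level_corrections_prefix_spec : Claim_equal_get_character_level_corrections_prefix := by
  intro hyp ref _ hpre
  unfold Spec_get_character_level_corrections_prefix
  unfold get_character_level_corrections_prefix
  rw [pv_loop_eq, pv_alt_sel, pvSel_eq]
  exact hpre
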